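-- pv_equiv track=rewrite | github.com/dasein108/cex_arbitrage | src/core/logging/backends/prometheus.py | _normalize_metric_name
-- ===== SOURCE A (Python) =====
-- def _normalize_metric_name(name: str) -> str:
--     """Normalize metric name for Prometheus."""
--     # Replace invalid characters with underscores
--     normalized = ""
--     for char in name:
--         if char.isalnum() or char == '_':
--             normalized += char.lower()
--         else:
--             normalized += '_'
--
--     # Ensure it starts with a letter or underscore
--     if normalized and not (normalized[0].isalpha() or normalized[0] == '_'):
--         normalized = f"metric_{normalized}"
--
--     # Remove duplicate underscores
--     while '__' in normalized:
--         normalized = normalized.replace('__', '_')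
--
--     return normalized.strip('_')
-- ===== SOURCE B (Python) =====
-- def _normalize_metric_name(name: str) -> str:
--     """Normalize metric name for Prometheus (single tokenizing pass)."""
--     tokens = []
--     cur = []
--     for ch in name:
--         if ch.isalnum():
--             cur.append(ch.lower())
--         elif cur:
--             tokens.append(''.join(cur))
--             cur = []
--     if cur:
--         tokens.append(''.join(cur))
--     result = '_'.join(tokens)
--     if result and name[:1].isdigit():
--         result = 'metric_' + result
--     return result
-- ===== Notes on version B (the rewrite author's own statement) =====
-- stated objective: simpler
-- what changed: B replaces A's build-then-fixup pipeline (per-character substitution, a conditional prefix, repeated collapsing of doubled separators in a while-loop, then stripping both ends) with a single pass that groups consecutive alphanumeric characters into lowercased tokens, joins the tokens with single separators, and prepends the metric prefix exactly when the name starts with a digit.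
import Mathlib
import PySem

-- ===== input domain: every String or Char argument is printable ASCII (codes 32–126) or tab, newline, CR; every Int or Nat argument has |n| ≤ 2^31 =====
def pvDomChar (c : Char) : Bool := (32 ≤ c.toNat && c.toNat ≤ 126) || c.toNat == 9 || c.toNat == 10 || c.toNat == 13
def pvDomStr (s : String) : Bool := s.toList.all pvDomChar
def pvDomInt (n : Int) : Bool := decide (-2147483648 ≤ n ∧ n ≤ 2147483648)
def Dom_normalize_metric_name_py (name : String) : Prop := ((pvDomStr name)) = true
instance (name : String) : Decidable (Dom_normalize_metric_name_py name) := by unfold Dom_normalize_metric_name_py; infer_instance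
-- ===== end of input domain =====

-- B is a single tokenizing pass (group alnum runs, join with '_') instead of A's
-- substitute / prefix / collapse-'__'-loop / strip pipeline; return values are equal.

-- ===== PORT A =====
-- one pass of Python's str.replace('__', '_'), written structurally (used to prove
-- termination of the while-loop port below; pvReplace_eq_pvPass shows it IS replace)
def pvPass : List Char → List Char
  | [] => []
  | [c] => [c]
  | a :: b :: t => if a = '_' ∧ b = '_' then '_' :: pvPass t else a :: pvPass (b :: t)
  termination_by l => l.length

theorem pvPass_go_eq (fuel : Nat) (l acc : List Char) (h : l.length ≤ fuel) :
    PySem.Chars.replace.go ['_', '_'] ['_'] fuel l acc = acc.reverse ++ pvPass l := by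
  induction fuel generalizing l acc with
  | zero =>
    rw [PySem.Chars.replace.go.eq_def]
    interval_cases h' : l.length
    · simp at h' ⊢
      subst h'
      simp [pvPass]
  | succ n ih =>
    rw [PySem.Chars.replace.go.eq_def]
    match l with
    | [] => simp [pvPass]
    | c :: t =>
      dsimp only
      by_cases hp : List.isPrefixOf ['_', '_'] (c :: t) = true
      · rw [if_pos hp]
        cases t with
        | nil => simp [List.isPrefixOf] at hp
        | cons d u =>
          obtain ⟨h1, h2⟩ : '_' = c ∧ '_' = d := by
            simpa [List.isPrefixOf] using hp
          subst h1; subst h2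
          rw [show List.drop (['_', '_'].length) ('_' :: '_' :: u) = u from rfl]
          rw [ih u _ (by simp at h; omega)]
          simp [pvPass]
      · rw [if_neg hp]
        rw [ih t (c :: acc) (by simpa using Nat.le_of_succ_le_succ h)]
        match t with
        | [] => simp [pvPass]
        | d :: u =>
          have hnot : ¬ (c = '_' ∧ d = '_') := by
            rintro ⟨rfl, rfl⟩
            simp [List.isPrefixOf] at hp
          simp [pvPass, hnot]

theorem pvReplace_eq_pvPass (ms : List Char) :
    PySem.Chars.replace ms ['_', '_'] ['_'] = pvPass ms := by
  unfold PySem.Chars.replace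
  simp [pvPass_go_eq ms.length ms [] (le_refl _)]

theorem pvPass_length_le (l : List Char) : (pvPass l).length ≤ l.length := by
  induction l using pvPass.induct with
  | case1 => simp [pvPass]
  | case2 c => simp [pvPass]
  | case3 a b t h ih => simp [pvPass, h]; omega
  | case4 a b t h ih => simp only [pvPass, if_neg h, List.length_cons]; simpa using ih

theorem pvPass_length_lt (l : List Char) (h : ['_', '_'] <:+: l) :
    (pvPass l).length < l.length := by
  induction l using pvPass.induct with
  | case1 => simp at h
  | case2 c =>
    exfalso
    have := h.length_le
    simp at this
  | case3 a b t hab ih =>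
    have := pvPass_length_le t
    simp [pvPass, hab]
    omega
  | case4 a b t hab ih =>
    simp only [pvPass, if_neg hab, List.length_cons]
    have h' : ['_', '_'] <:+: b :: t := by
      rcases (List.infix_cons_iff).mp h with hp | hs
      · exfalso
        rcases hp with ⟨r, hr⟩
        simp only [List.cons_append, List.nil_append, List.cons.injEq] at hr
        exact hab ⟨hr.1.symm, hr.2.1.symm⟩
      · exact hs
    simpa using ih h'

-- the while '__' in s: s = s.replace('__','_') loop of A
def pvCollapse (ms : List Char) : List Char :=
  if h : PySem.Chars.isIn ['_', '_'] ms = true then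
    pvCollapse (PySem.Chars.replace ms ['_', '_'] ['_'])
  else ms
  termination_by ms.length
  decreasing_by
    rw [pvReplace_eq_pvPass]
    exact pvPass_length_lt ms ((PySem.Chars.isIn_iff_infix _ _).mp h)

def normalize_metric_name_py (name : String) : String :=
  -- normalized = "";  for char in name: normalized += (char.lower() if valid else '_')
  let normalized := name.toList.foldl
    (fun acc c => acc ++ [if PySem.Chars.isalnum c || c == '_' then PySem.Chars.lowerChar c else '_']) []
  -- if normalized and not (normalized[0].isalpha() or normalized[0] == '_'): prefix
  let normalized2 :=
    if normalized ≠ [] ∧ ¬ (PySem.Chars.isalpha normalized.headI = true ∨ normalized.headI = '_') then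
      "metric_".toList ++ normalized
    else normalized
  -- while '__' in normalized: replace;  then .strip('_')
  String.ofList (PySem.Chars.stripChars (pvCollapse normalized2) ['_'])

-- ===== PORT B =====
def normalize_metric_name_py_alt (name : String) : String :=
  let cs := name.toList
  -- one pass: group consecutive alnum chars (lowercased) into tokens
  let st := cs.foldl
    (fun (st : List (List Char) × List Char) c =>
      if PySem.Chars.isalnum c then (st.1, st.2 ++ [PySem.Chars.lowerChar c])
      else if st.2 ≠ [] then (st.1 ++ [st.2], []) else st)
    ([], [])
  let tokens := st.1 ++ (if st.2 ≠ [] then [st.2] else [])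
  -- result = '_'.join(tokens)
  let result := PySem.Chars.join ['_'] tokens
  -- if result and name[:1].isdigit(): result = 'metric_' + result
  let result2 :=
    if result ≠ [] ∧ PySem.Chars.strIsdigit (cs.take 1) = true then
      "metric_".toList ++ result
    else result
  String.ofList result2

-- ===== PRECONDITION & SPEC =====
def Spec_normalize_metric_name_py (name : String) (out : String) : Prop := out = normalize_metric_name_py_alt name
instance (name : String) (out : String) : Decidable (Spec_normalize_metric_name_py name out) := by unfold Spec_normalize_metric_name_py; infer_instance

-- ===== CLAIM (what is proved, stated in full; the proofs are below) =====
def Claim_equal_normalize_metric_name_py : Prop := ∀ (name : String), Dom_normalize_metric_name_py name → Spec_normalize_metric_name_py name (normalize_metric_name_py name)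

-- ===== LEMMAS AND PROOFS =====

-- Char-class facts
theorem pvCharLe (c d : Char) : (c ≤ d) ↔ c.toNat ≤ d.toNat := by
  rw [Char.le_def, UInt32.le_iff_toNat_le]; exact Iff.rfl

theorem pvCharEq (c d : Char) : c = d ↔ c.toNat = d.toNat := by
  constructor
  · rintro rfl; rfl
  · intro h; exact Char.ext (UInt32.toNat_inj.mp h)

theorem pvCharToNat (c : Char) :
    PySem.Chars.isupper c = true ↔ 65 ≤ c.toNat ∧ c.toNat ≤ 90 := by
  simp only [PySem.Chars.isupper, Bool.and_eq_true, decide_eq_true_eq, pvCharLe]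
  exact Iff.rfl

theorem pvCharLowerNat (c : Char) :
    PySem.Chars.islower c = true ↔ 97 ≤ c.toNat ∧ c.toNat ≤ 122 := by
  simp only [PySem.Chars.islower, Bool.and_eq_true, decide_eq_true_eq, pvCharLe]
  exact Iff.rfl

theorem pvCharDigitNat (c : Char) :
    PySem.Chars.isdigit c = true ↔ 48 ≤ c.toNat ∧ c.toNat ≤ 57 := by
  simp only [PySem.Chars.isdigit, Bool.and_eq_true, decide_eq_true_eq, pvCharLe]
  exact Iff.rfl

theorem pvLowerChar_upper (c : Char) (h : PySem.Chars.isupper c = true) :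
    (PySem.Chars.lowerChar c).toNat = c.toNat + 32 := by
  rw [pvCharToNat] at h
  unfold PySem.Chars.lowerChar
  rw [if_pos ((pvCharToNat c).mpr h)]
  rw [Char.toNat_ofNat, if_pos]
  left; omega

theorem pvLower_digit (c : Char) (h : PySem.Chars.isdigit c = true) : PySem.Chars.lowerChar c = c := by
  rw [pvCharDigitNat] at h
  unfold PySem.Chars.lowerChar
  rw [if_neg]
  rw [pvCharToNat]
  omega

theorem pvLower_ne_underscore (c : Char) (h : PySem.Chars.isalnum c = true) :
    PySem.Chars.lowerChar c ≠ '_' := by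
  simp only [PySem.Chars.isalnum, PySem.Chars.isalpha, Bool.or_eq_true, pvCharToNat,
    pvCharLowerNat, pvCharDigitNat] at h
  intro he
  rw [pvCharEq] at he
  have h95 : ('_' : Char).toNat = 95 := rfl
  rcases h with (hu | hl) | hd
  · rw [pvLowerChar_upper c ((pvCharToNat c).mpr hu)] at he; omega
  · rw [show PySem.Chars.lowerChar c = c from by
      unfold PySem.Chars.lowerChar; rw [if_neg]; rw [pvCharToNat]; omega] at he
    omega
  · rw [pvLower_digit c ((pvCharDigitNat c).mpr hd)] at he; omega

theorem pvAlpha_lower (c : Char) : PySem.Chars.isalpha (PySem.Chars.lowerChar c) = PySem.Chars.isalpha c := by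
  by_cases hu : PySem.Chars.isupper c = true
  · have hn := pvLowerChar_upper c hu
    rw [pvCharToNat] at hu
    simp only [PySem.Chars.isalpha, Bool.or_eq_true]
    have h1 : PySem.Chars.islower (PySem.Chars.lowerChar c) = true := by
      rw [pvCharLowerNat]; omega
    have h2 : PySem.Chars.isupper c = true := by rw [pvCharToNat]; omega
    simp [h1, h2]
  · rw [show PySem.Chars.lowerChar c = c from by unfold PySem.Chars.lowerChar; rw [if_neg hu]]

theorem pvDigit_not_alpha (c : Char) (h : PySem.Chars.isdigit c = true) : PySem.Chars.isalpha c = false := by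
  rw [pvCharDigitNat] at h
  simp only [PySem.Chars.isalpha, Bool.or_eq_false_iff]
  constructor
  · rw [Bool.eq_false_iff, Ne, pvCharToNat]; omega
  · rw [Bool.eq_false_iff, Ne, pvCharLowerNat]; omega

-- mapped character of A's first loop
def pvMap (c : Char) : Char :=
  if PySem.Chars.isalnum c || c == '_' then PySem.Chars.lowerChar c else '_'

theorem pvMap_of_not_alnum (c : Char) (ha : ¬ PySem.Chars.isalnum c = true) :
    (if PySem.Chars.isalnum c || c == '_' then PySem.Chars.lowerChar c else '_') = '_' := by
  by_cases hc : c = '_'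
  · subst hc
    rw [if_pos (by simp)]
    unfold PySem.Chars.lowerChar
    rw [if_neg]
    rw [pvCharToNat]
    have : ('_' : Char).toNat = 95 := rfl
    omega
  · rw [if_neg (by simp [ha, hc])]

theorem pvMap_cond (c : Char) :
    (¬ (PySem.Chars.isalpha (pvMap c) = true ∨ pvMap c = '_')) ↔ PySem.Chars.isdigit c = true := by
  unfold pvMap
  by_cases ha : PySem.Chars.isalnum c = true
  · rw [if_pos (by simp [ha])]
    constructor
    · intro hc
      push_neg at hc
      have h1 : PySem.Chars.isalpha c = false := by
        rw [← pvAlpha_lower c]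
        exact Bool.eq_false_iff.mpr hc.1
      have := ha
      simp only [PySem.Chars.isalnum, Bool.or_eq_true, h1] at this
      simpa using this
    · intro hd
      push_neg
      refine ⟨?_, pvLower_ne_underscore c ha⟩
      rw [pvAlpha_lower c, pvDigit_not_alpha c hd]
      simp
  · rw [show (if PySem.Chars.isalnum c || c == '_' then PySem.Chars.lowerChar c else '_') = '_' from pvMap_of_not_alnum c ha]
    constructor
    · intro hc; exfalso; exact hc (Or.inr rfl)
    · intro hd
      exfalso
      apply ha
      simp [PySem.Chars.isalnum, hd]

theorem pvMap_ne_underscore_iff (c : Char) : (pvMap c ≠ '_') ↔ PySem.Chars.isalnum c = true := by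
  unfold pvMap
  by_cases ha : PySem.Chars.isalnum c = true
  · rw [if_pos (by simp [ha])]
    simp [ha, pvLower_ne_underscore c ha]
  · rw [show (if PySem.Chars.isalnum c || c == '_' then PySem.Chars.lowerChar c else '_') = '_' from pvMap_of_not_alnum c ha]
    simpa using ha

-- squeeze: the fixpoint of repeated replace('__','_')
def pvSq : List Char → List Char
  | [] => []
  | [c] => [c]
  | a :: b :: t => if a = '_' ∧ b = '_' then pvSq ('_' :: t) else a :: pvSq (b :: t)
  termination_by l => l.length

theorem pvPass_cons (c : Char) (t : List Char) : ∃ r, pvPass (c :: t) = c :: r := by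
  cases t with
  | nil => exact ⟨[], by rw [pvPass]⟩
  | cons d u =>
    by_cases h : c = '_' ∧ d = '_'
    · refine ⟨pvPass u, ?_⟩
      rw [show pvPass (c :: d :: u) = '_' :: pvPass u from by rw [pvPass, if_pos h], h.1]
    · exact ⟨pvPass (d :: u), by rw [pvPass, if_neg h]⟩

theorem pvSq_underscore (t : List Char) :
    pvSq ('_' :: t) = '_' :: pvSq (t.dropWhile (· = '_')) := by
  induction t with
  | nil => simp [pvSq]
  | cons d u ih =>
    by_cases hd : d = '_'
    · subst hd
      rw [show pvSq ('_' :: '_' :: u) = pvSq ('_' :: u) from by rw [pvSq, if_pos ⟨rfl, rfl⟩], ih]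
      simp
    · rw [show pvSq ('_' :: d :: u) = '_' :: pvSq (d :: u) from by
        rw [pvSq, if_neg (by simp [hd])]]
      rw [List.dropWhile_cons_of_neg (by simpa using hd)]

theorem pvPass_dropWhile (t : List Char) :
    (pvPass t).dropWhile (· = '_') = pvPass (t.dropWhile (· = '_')) := by
  induction t using pvPass.induct with
  | case1 => simp [pvPass]
  | case2 c =>
    by_cases hc : c = '_'
    · subst hc; simp [pvPass]
    · rw [show pvPass [c] = [c] from by rw [pvPass],
        List.dropWhile_cons_of_neg (by simpa using hc), pvPass]
  | case3 a b t hab ih =>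
    obtain ⟨rfl, rfl⟩ := hab
    rw [show pvPass ('_' :: '_' :: t) = '_' :: pvPass t from by rw [pvPass, if_pos ⟨rfl, rfl⟩]]
    rw [List.dropWhile_cons_of_pos (by simp), List.dropWhile_cons_of_pos (by simp),
      List.dropWhile_cons_of_pos (by simp)]
    exact ih
  | case4 a b t hab ih =>
    rw [show pvPass (a :: b :: t) = a :: pvPass (b :: t) from by rw [pvPass, if_neg hab]]
    by_cases ha : a = '_'
    · subst ha
      have hb : ¬ b = '_' := fun hb => hab ⟨rfl, hb⟩
      rw [List.dropWhile_cons_of_pos (by simp), List.dropWhile_cons_of_pos (by simp)]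
      rw [ih, List.dropWhile_cons_of_neg (by simpa using hb)]
    · rw [List.dropWhile_cons_of_neg (by simpa using ha),
        List.dropWhile_cons_of_neg (by simpa using ha)]
      rw [pvPass, if_neg hab]

theorem pvSq_pvPass (ms : List Char) : pvSq (pvPass ms) = pvSq ms := by
  have H : ∀ n (ms : List Char), ms.length ≤ n → pvSq (pvPass ms) = pvSq ms := by
    intro n
    induction n with
    | zero =>
      intro ms h
      obtain rfl : ms = [] := List.length_eq_zero_iff.mp (Nat.le_zero.mp h)
      rw [pvPass]
    | succ n ih =>
      intro ms h
      match ms with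
      | [] => rw [pvPass]
      | [c] => rw [pvPass]
      | a :: b :: t =>
        by_cases hab : a = '_' ∧ b = '_'
        · obtain ⟨rfl, rfl⟩ := hab
          rw [show pvPass ('_' :: '_' :: t) = '_' :: pvPass t from by rw [pvPass, if_pos ⟨rfl, rfl⟩]]
          rw [pvSq_underscore, pvPass_dropWhile]
          rw [ih (t.dropWhile (· = '_')) (by
            have := List.length_dropWhile_le (· = '_') t
            simp at h; omega)]
          rw [show pvSq ('_' :: '_' :: t) = pvSq ('_' :: t) from by rw [pvSq, if_pos ⟨rfl, rfl⟩]]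
          rw [pvSq_underscore]
        · rw [show pvPass (a :: b :: t) = a :: pvPass (b :: t) from by rw [pvPass, if_neg hab]]
          obtain ⟨r, hr⟩ := pvPass_cons b t
          rw [hr]
          rw [show pvSq (a :: b :: r) = a :: pvSq (b :: r) from by rw [pvSq, if_neg hab]]
          rw [← hr, ih (b :: t) (by simp at h ⊢; omega)]
          rw [pvSq, if_neg hab]
  exact H ms.length ms le_rfl

theorem pvSq_of_no_dunder (ms : List Char) (h : ¬ (['_', '_'] <:+: ms)) : pvSq ms = ms := by
  induction ms using pvSq.induct with
  | case1 => rw [pvSq]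
  | case2 c => rw [pvSq]
  | case3 a b t hab ih =>
    exfalso
    obtain ⟨rfl, rfl⟩ := hab
    exact h ⟨[], t, rfl⟩
  | case4 a b t hab ih =>
    rw [pvSq, if_neg hab]
    rw [ih (fun hi => h ((List.infix_cons_iff).mpr (Or.inr hi)))]

theorem pvCollapse_eq_pvSq (ms : List Char) : pvCollapse ms = pvSq ms := by
  have H : ∀ n (ms : List Char), ms.length ≤ n → pvCollapse ms = pvSq ms := by
    intro n
    induction n with
    | zero =>
      intro ms h
      obtain rfl : ms = [] := List.length_eq_zero_iff.mp (Nat.le_zero.mp h)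
      rw [pvCollapse, dif_neg (by decide), pvSq]
    | succ n ih =>
      intro ms h
      rw [pvCollapse]
      by_cases hin : PySem.Chars.isIn ['_', '_'] ms = true
      · rw [dif_pos hin, pvReplace_eq_pvPass]
        have hlt := pvPass_length_lt ms ((PySem.Chars.isIn_iff_infix _ _).mp hin)
        rw [ih (pvPass ms) (by omega)]
        exact pvSq_pvPass ms
      · rw [dif_neg hin]
        exact (pvSq_of_no_dunder ms
          ((PySem.Chars.isIn_eq_false_iff _ _).mp (Bool.not_eq_true _ ▸ Bool.of_not_eq_true hin))).symm
  exact H ms.length ms le_rfl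

theorem pvSq_head (ms : List Char) : (pvSq ms).head? = ms.head? := by
  induction ms using pvSq.induct with
  | case1 => rw [pvSq]
  | case2 c => rw [pvSq]
  | case3 a b t hab ih =>
    obtain ⟨rfl, rfl⟩ := hab
    rw [show pvSq ('_' :: '_' :: t) = pvSq ('_' :: t) from by rw [pvSq, if_pos ⟨rfl, rfl⟩], ih]
    rfl
  | case4 a b t hab ih =>
    rw [pvSq, if_neg hab]
    rfl

theorem pvSq_run (run b : List Char) (h : ∀ x ∈ run, x ≠ '_') :
    pvSq (run ++ b) = run ++ pvSq b := by
  induction run with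
  | nil => simp
  | cons x rs ih =>
    have hx : x ≠ '_' := h x (by simp)
    match hrb : rs ++ b with
    | [] =>
      obtain ⟨rfl, rfl⟩ := List.append_eq_nil_iff.mp hrb
      simp [pvSq]
    | y :: ys =>
      rw [List.cons_append, hrb]
      rw [show pvSq (x :: y :: ys) = x :: pvSq (y :: ys) from by
        rw [pvSq, if_neg (fun hc => hx hc.1)]]
      rw [← hrb, ih (fun z hz => h z (by simp [hz]))]
      simp

-- strip('_') decomposed
def pvRS (l : List Char) : List Char := (l.reverse.dropWhile (· = '_')).reverse

def pvStrip (l : List Char) : List Char := pvRS (l.dropWhile (· = '_'))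

theorem pvStripChars_eq (l : List Char) : PySem.Chars.stripChars l ['_'] = pvStrip l := by
  unfold PySem.Chars.stripChars pvStrip pvRS
  have hp : (fun c => List.contains ['_'] c) = (fun c : Char => decide (c = '_')) := by
    funext c
    by_cases h : c = '_' <;> simp [h]
  rw [hp]

theorem pvDropWhile_no (p : Char → Bool) (l : List Char) (h : ∀ a ∈ l, p a = false) :
    l.dropWhile p = l := by
  cases l with
  | nil => rfl
  | cons a t => exact List.dropWhile_cons_of_neg (by simp [h a (by simp)])

theorem pvDropWhile_head (p : Char → Bool) (l : List Char) (a : Char)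
    (h : (l.dropWhile p).head? = some a) : p a = false := by
  induction l with
  | nil => simp at h
  | cons x t ih =>
    by_cases hx : p x = true
    · rw [List.dropWhile_cons_of_pos hx] at h
      exact ih h
    · rw [List.dropWhile_cons_of_neg hx] at h
      simp at h
      subst h
      simpa using hx

theorem pvRS_run (run x : List Char) (h : ∀ c ∈ run, c ≠ '_') :
    pvRS (run ++ x) = run ++ pvRS x := by
  unfold pvRS
  rw [List.reverse_append, List.dropWhile_append]
  by_cases he : (x.reverse.dropWhile (· = '_')).isEmpty = true
  · rw [if_pos he]
    rw [List.isEmpty_iff.mp he]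
    rw [pvDropWhile_no _ _ (fun a ha => by
      simpa using h a (by simpa using ha))]
    simp
  · rw [if_neg he]
    rw [List.reverse_append, List.reverse_reverse]

theorem pvRS_cons_underscore (l : List Char) (c : Char) (h : l.head? = some c) (hc : c ≠ '_') :
    pvRS ('_' :: l) = '_' :: pvRS l := by
  unfold pvRS
  rw [List.reverse_cons, List.dropWhile_append]
  have hne : ¬ (l.reverse.dropWhile (· = '_')).isEmpty = true := by
    rw [List.isEmpty_iff]
    intro hnil
    rw [List.dropWhile_eq_nil_iff] at hnil
    have hcl : c ∈ l.reverse := by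
      simp only [List.mem_reverse]
      exact List.mem_of_mem_head? (by simpa using h)
    have := hnil c hcl
    simp at this
    exact hc this
  rw [if_neg hne, List.reverse_append]
  rfl

-- tokens of the mapped string (split at '_')
def pvToks : List Char → List (List Char)
  | [] => []
  | c :: t =>
    if c = '_' then pvToks t
    else (c :: t.takeWhile (· ≠ '_')) :: pvToks (t.dropWhile (· ≠ '_'))
  termination_by l => l.length
  decreasing_by
    · simp
    · simp only [List.length_cons]
      exact Nat.lt_succ_of_le (List.length_dropWhile_le _ _)

def pvJoin : List (List Char) → List Char
  | [] => []
  | [a] => a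
  | a :: b :: t => a ++ '_' :: pvJoin (b :: t)

theorem pvJoin_eq_intercalate (ts : List (List Char)) : pvJoin ts = List.intercalate ['_'] ts := by
  induction ts with
  | nil => simp [pvJoin, List.intercalate]
  | cons a rest ih =>
    cases rest with
    | nil => simp [pvJoin, List.intercalate]
    | cons b t =>
      rw [pvJoin, ih]
      simp [List.intercalate, List.intersperse]

theorem pvJoin_ne_nil (a : List Char) (rest : List (List Char)) (ha : a ≠ []) :
    pvJoin (a :: rest) ≠ [] := by
  cases rest with
  | nil => simpa [pvJoin] using ha
  | cons b t =>
    rw [pvJoin]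
    simpa using fun h => ha h

theorem pvToks_dropWhile (t : List Char) : pvToks (t.dropWhile (· = '_')) = pvToks t := by
  induction t with
  | nil => rfl
  | cons d u ih =>
    by_cases hd : d = '_'
    · subst hd
      rw [List.dropWhile_cons_of_pos (by simp), ih,
        show pvToks ('_' :: u) = pvToks u from by rw [pvToks, if_pos rfl]]
    · rw [List.dropWhile_cons_of_neg (by simpa using hd)]

-- a list whose head is not '_' is untouched by the leading strip
theorem pvStrip_of_head (l : List Char) (c : Char) (h : l.head? = some c) (hc : c ≠ '_') :
    pvStrip l = pvRS l := by
  unfold pvStrip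
  cases l with
  | nil => simp at h
  | cons x t =>
    simp only [List.head?_cons, Option.some.injEq] at h
    subst h
    rw [List.dropWhile_cons_of_neg (by simpa using hc)]

-- MAIN A-side characterisation
theorem pvStrip_pvSq (ms : List Char) : pvStrip (pvSq ms) = pvJoin (pvToks ms) := by
  have H : ∀ n (ms : List Char), ms.length ≤ n → pvStrip (pvSq ms) = pvJoin (pvToks ms) := by
    intro n
    induction n with
    | zero =>
      intro ms h
      obtain rfl : ms = [] := List.length_eq_zero_iff.mp (Nat.le_zero.mp h)
      rw [pvSq, pvToks, pvJoin]
      rfl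
    | succ n ih =>
      intro ms h
      match ms with
      | [] =>
        rw [pvSq, pvToks, pvJoin]
        rfl
      | c :: t =>
        by_cases hc : c = '_'
        · subst hc
          -- leading underscores: both sides ignore them
          rw [pvSq_underscore]
          rw [show pvToks ('_' :: t) = pvToks t from by rw [pvToks, if_pos rfl]]
          rw [← pvToks_dropWhile t]
          have hlen' := List.length_dropWhile_le (fun c => decide (c = '_')) t
          rcases hdu : t.dropWhile (· = '_') with _ | ⟨d, u'⟩
          · rw [pvSq]
            unfold pvStrip pvRS
            rw [List.dropWhile_cons_of_pos (by simp)]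
            rw [pvToks, pvJoin]
            rfl
          · have hd : d ≠ '_' := by
              have := pvDropWhile_head _ t d (by rw [hdu]; rfl)
              simpa using this
            have hlen : (d :: u').length ≤ n := by
              rw [hdu] at hlen'
              simp only [List.length_cons] at h hlen' ⊢
              omega
            obtain ⟨rest, hrest⟩ : ∃ rest, pvSq (d :: u') = d :: rest := by
              have hhead : (pvSq (d :: u')).head? = some d := by rw [pvSq_head]; rfl
              cases hsq : pvSq (d :: u') with
              | nil => rw [hsq] at hhead; simp at hhead
              | cons e r =>
                rw [hsq] at hhead
                simp only [List.head?_cons, Option.some.injEq] at hhead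
                exact ⟨r, by rw [hhead]⟩
            unfold pvStrip
            rw [List.dropWhile_cons_of_pos (by simp), hrest,
              List.dropWhile_cons_of_neg (by simpa using hd), ← hrest]
            rw [← pvStrip_of_head (pvSq (d :: u')) d (by rw [pvSq_head]; rfl) hd]
            exact ih (d :: u') hlen
        · -- a run of non-underscore characters, then the rest
          have hsplit : c :: t = (c :: t.takeWhile (· ≠ '_')) ++ t.dropWhile (· ≠ '_') := by
            rw [List.cons_append, List.takeWhile_append_dropWhile]
          have hrun : ∀ x ∈ c :: t.takeWhile (· ≠ '_'), x ≠ '_' := by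
            intro x hx
            rcases List.mem_cons.mp hx with rfl | hx'
            · exact hc
            · simpa using List.mem_takeWhile_imp hx'
          rw [show pvToks (c :: t) =
              (c :: t.takeWhile (· ≠ '_')) :: pvToks (t.dropWhile (· ≠ '_')) from by
            rw [pvToks, if_neg hc]]
          rw [hsplit, pvSq_run _ _ hrun]
          have hstrip : pvStrip ((c :: t.takeWhile (· ≠ '_')) ++ pvSq (t.dropWhile (· ≠ '_'))) =
              (c :: t.takeWhile (· ≠ '_')) ++ pvRS (pvSq (t.dropWhile (· ≠ '_'))) := by
            unfold pvStrip
            rw [List.cons_append, List.dropWhile_cons_of_neg (by simpa using hc), ← List.cons_append]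
            exact pvRS_run _ _ hrun
          rw [hstrip]
          have hblen := List.length_dropWhile_le (fun c => decide (¬ c = '_')) t
          rcases hbb : t.dropWhile (· ≠ '_') with _ | ⟨e, f⟩
          · rw [pvSq, pvToks, pvJoin]
            simp [pvRS]
          · have he : e = '_' := by
              have := pvDropWhile_head _ t e (by rw [hbb]; rfl)
              simpa using this
            subst he
            rw [pvSq_underscore]
            rw [show pvToks ('_' :: f) = pvToks f from by rw [pvToks, if_pos rfl]]
            rw [← pvToks_dropWhile f]
            have hflen' := List.length_dropWhile_le (fun c => decide (c = '_')) f
            rcases hff : f.dropWhile (· = '_') with _ | ⟨g, h'⟩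
            · rw [pvSq]
              rw [show pvRS ['_'] = [] from by decide]
              rw [pvToks, pvJoin]
              simp [pvJoin]
            · have hg : g ≠ '_' := by
                have := pvDropWhile_head _ f g (by rw [hff]; rfl)
                simpa using this
              have hglen : (g :: h').length ≤ n := by
                rw [hbb] at hblen
                rw [hff] at hflen'
                simp only [List.length_cons] at h hblen hflen' ⊢
                omega
              rw [pvRS_cons_underscore (pvSq (g :: h')) g (by rw [pvSq_head]; rfl) hg]
              rw [← pvStrip_of_head (pvSq (g :: h')) g (by rw [pvSq_head]; rfl) hg]
              rw [ih (g :: h') hglen]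
              have htoks_ne : pvToks (g :: h') ≠ [] := by
                rw [pvToks, if_neg hg]
                simp
              rcases htk : pvToks (g :: h') with _ | ⟨tk, tks⟩
              · exact absurd htk htoks_ne
              · rw [pvJoin]
  exact H ms.length ms le_rfl

-- B-side: tokens of the source string
def pvToksB : List Char → List (List Char)
  | [] => []
  | c :: t =>
    if PySem.Chars.isalnum c = true then
      ((c :: t.takeWhile (fun x => PySem.Chars.isalnum x)).map PySem.Chars.lowerChar)
        :: pvToksB (t.dropWhile (fun x => PySem.Chars.isalnum x))
    else pvToksB t
  termination_by l => l.length
  decreasing_by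
    · simp only [List.length_cons]
      exact Nat.lt_succ_of_le (List.length_dropWhile_le _ _)
    · simp

def pvAcc (cur : List Char) : List Char → List (List Char)
  | [] => if cur = [] then [] else [cur]
  | c :: t =>
    if PySem.Chars.isalnum c = true then pvAcc (cur ++ [PySem.Chars.lowerChar c]) t
    else (if cur = [] then [] else [cur]) ++ pvAcc [] t

def pvStep (st : List (List Char) × List Char) (c : Char) : List (List Char) × List Char :=
  if PySem.Chars.isalnum c then (st.1, st.2 ++ [PySem.Chars.lowerChar c])
  else if st.2 ≠ [] then (st.1 ++ [st.2], []) else st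

theorem pvFold_eq_pvAcc (cs : List Char) (T : List (List Char)) (C : List Char) :
    (cs.foldl pvStep (T, C)).1 ++
      (if (cs.foldl pvStep (T, C)).2 ≠ [] then [(cs.foldl pvStep (T, C)).2] else []) =
    T ++ pvAcc C cs := by
  induction cs generalizing T C with
  | nil =>
    by_cases hC : C = []
    · subst hC
      simp [pvAcc]
    · rw [pvAcc, if_neg hC]
      simp [hC]
  | cons c t ih =>
    rw [List.foldl_cons]
    by_cases ha : PySem.Chars.isalnum c = true
    · rw [show pvStep (T, C) c = (T, C ++ [PySem.Chars.lowerChar c]) from by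
        unfold pvStep; rw [if_pos ha]]
      rw [ih, pvAcc, if_pos ha]
    · by_cases hC : C = []
      · rw [show pvStep (T, C) c = (T, C) from by
          unfold pvStep; rw [if_neg ha, if_neg (by simp [hC])]]
        rw [ih, pvAcc, if_neg ha, hC, if_pos rfl, List.nil_append]
      · rw [show pvStep (T, C) c = (T ++ [C], []) from by
          unfold pvStep; rw [if_neg ha, if_pos (by simp [hC])]]
        rw [ih, pvAcc, if_neg ha, if_neg hC, List.append_assoc]

theorem pvAcc_eq (cs : List Char) (cur : List Char) :
    pvAcc cur cs =
      if cur = [] then pvToksB cs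
      else (cur ++ (cs.takeWhile (fun x => PySem.Chars.isalnum x)).map PySem.Chars.lowerChar)
        :: pvToksB (cs.dropWhile (fun x => PySem.Chars.isalnum x)) := by
  induction cs generalizing cur with
  | nil =>
    by_cases hC : cur = []
    · simp [pvAcc, hC, pvToksB]
    · rw [pvAcc, if_neg hC, if_neg hC]
      simp only [List.takeWhile_nil, List.dropWhile_nil, List.map_nil, List.append_nil]
      rw [pvToksB]
  | cons c t ih =>
    by_cases ha : PySem.Chars.isalnum c = true
    · rw [pvAcc, if_pos ha, ih]
      rw [if_neg (by simp)]
      rw [List.takeWhile_cons_of_pos ha, List.dropWhile_cons_of_pos ha]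
      by_cases hC : cur = []
      · subst hC
        rw [if_pos rfl]
        rw [show pvToksB (c :: t) =
            ((c :: t.takeWhile (fun x => PySem.Chars.isalnum x)).map PySem.Chars.lowerChar)
              :: pvToksB (t.dropWhile (fun x => PySem.Chars.isalnum x)) from by
          rw [pvToksB, if_pos ha]]
        simp
      · rw [if_neg hC]
        simp
    · rw [pvAcc, if_neg ha, ih, if_pos rfl]
      by_cases hC : cur = []
      · subst hC
        rw [if_pos rfl, if_pos rfl]
        rw [pvToksB, if_neg ha]
        simp
      · rw [if_neg hC, if_neg hC]
        rw [List.takeWhile_cons_of_neg ha, List.dropWhile_cons_of_neg ha]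
        rw [pvToksB, if_neg ha]
        simp

theorem pvToks_map (cs : List Char) : pvToks (cs.map pvMap) = pvToksB cs := by
  have H : ∀ n (cs : List Char), cs.length ≤ n → pvToks (cs.map pvMap) = pvToksB cs := by
    intro n
    induction n with
    | zero =>
      intro cs h
      obtain rfl : cs = [] := List.length_eq_zero_iff.mp (Nat.le_zero.mp h)
      rw [List.map_nil, pvToks, pvToksB]
    | succ n ih =>
      intro cs h
      match cs with
      | [] => rw [List.map_nil, pvToks, pvToksB]
      | c :: t =>
        rw [List.map_cons]
        by_cases ha : PySem.Chars.isalnum c = true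
        · have hne : ¬ pvMap c = '_' := (pvMap_ne_underscore_iff c).mpr ha
          rw [pvToks, if_neg hne]
          rw [pvToksB, if_pos ha]
          have hpred : (fun x : Char => decide (x ≠ '_')) ∘ pvMap = fun x => PySem.Chars.isalnum x := by
            funext x
            simp only [Function.comp_apply, decide_eq_true_eq]
            by_cases hx : PySem.Chars.isalnum x = true
            · simp [hx, (pvMap_ne_underscore_iff x).mpr hx]
            · have hm : pvMap x = '_' := by unfold pvMap; exact pvMap_of_not_alnum x hx
              simp [hx, hm]
          rw [List.takeWhile_map, List.dropWhile_map, hpred]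
          congr 1
          · rw [show pvMap c = PySem.Chars.lowerChar c from by
              unfold pvMap; rw [if_pos (by simp [ha])]]
            rw [List.map_cons]
            congr 1
            apply List.map_congr_left
            intro x hx
            have hax : PySem.Chars.isalnum x = true := List.mem_takeWhile_imp hx
            unfold pvMap
            rw [if_pos (by simp [hax])]
          · exact ih (t.dropWhile fun x => PySem.Chars.isalnum x)
              (le_trans (List.length_dropWhile_le _ _) (by simpa using Nat.le_of_succ_le_succ h))
        · have heq : pvMap c = '_' := pvMap_of_not_alnum c ha
          rw [heq, pvToksB, if_neg ha]
          rw [show pvToks ('_' :: t.map pvMap) = pvToks (t.map pvMap) from by rw [pvToks, if_pos rfl]]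
          exact ih t (by simpa using Nat.le_of_succ_le_succ h)
  exact H cs.length cs le_rfl

theorem pvStrIsdigit_single (c : Char) :
    PySem.Chars.strIsdigit [c] = PySem.Chars.isdigit c := by
  simp [PySem.Chars.strIsdigit]

-- A's 'metric_' prefix survives collapsing and stripping when the rest starts with a non-underscore
set_option maxRecDepth 8192 in
theorem pvPrefix (ms : List Char) (c : Char) (h : ms.head? = some c) (hc : c ≠ '_') :
    pvStrip (pvSq ("metric_".toList ++ ms)) = "metric_".toList ++ pvStrip (pvSq ms) := by
  cases ms with
  | nil => simp at h
  | cons m tl =>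
    simp only [List.head?_cons, Option.some.injEq] at h
    subst h
    have h1 : "metric_".toList ++ (m :: tl) = ['m','e','t','r','i','c'] ++ ('_' :: (m :: tl)) := rfl
    rw [h1]
    rw [pvSq_run _ _ (by intro x hx; fin_cases hx <;> decide)]
    rw [pvSq_underscore]
    rw [List.dropWhile_cons_of_neg (by simpa using hc)]
    rw [pvStrip_of_head _ 'm' rfl (by decide)]
    rw [pvRS_run _ _ (by intro x hx; fin_cases hx <;> decide)]
    rw [pvRS_cons_underscore (pvSq (m :: tl)) m (by rw [pvSq_head]; rfl) hc]
    rw [← pvStrip_of_head (pvSq (m :: tl)) m (by rw [pvSq_head]; rfl) hc]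
    rfl

-- ===== VERDICT (by name: the statement is the Claim_ definition above) =====
theorem normalize_metric_name_py_spec : Claim_equal_normalize_metric_name_py := by
  intro name _
  unfold Spec_normalize_metric_name_py normalize_metric_name_py normalize_metric_name_py_alt
  dsimp only
  rw [PySem.List.foldl_append_singleton_eq_map
    (fun c => if PySem.Chars.isalnum c || c == '_' then PySem.Chars.lowerChar c else '_')
    name.toList []]
  rw [List.nil_append]
  rw [show (fun c => if PySem.Chars.isalnum c || c == '_' then PySem.Chars.lowerChar c else '_') = pvMap from rfl]
  rw [show (fun (st : List (List Char) × List Char) c =>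
      if PySem.Chars.isalnum c then (st.1, st.2 ++ [PySem.Chars.lowerChar c])
      else if st.2 ≠ [] then (st.1 ++ [st.2], []) else st) = pvStep from rfl]
  rw [pvFold_eq_pvAcc name.toList [] [], List.nil_append, pvAcc_eq, if_pos rfl]
  rw [show PySem.Chars.join ['_'] (pvToksB name.toList) = pvJoin (pvToksB name.toList) from
    (pvJoin_eq_intercalate (pvToksB name.toList)).symm]
  rw [pvCollapse_eq_pvSq, pvStripChars_eq]
  cases hcs : name.toList with
  | nil =>
    rw [List.map_nil]
    rw [if_neg (by simp)]
    rw [pvStrip_pvSq, pvToks, pvJoin]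
    rw [show pvToksB [] = [] from by rw [pvToksB]]
    rw [pvJoin]
    rw [if_neg (by simp)]
  | cons c0 t =>
    rw [List.map_cons]
    by_cases hd : PySem.Chars.isdigit c0 = true
    · have ha : PySem.Chars.isalnum c0 = true := by
        simp [PySem.Chars.isalnum, hd]
      have hne : pvMap c0 ≠ '_' := (pvMap_ne_underscore_iff c0).mpr ha
      have hcondA : pvMap c0 :: List.map pvMap t ≠ [] ∧
          ¬ (PySem.Chars.isalpha (pvMap c0 :: List.map pvMap t).headI = true ∨
            (pvMap c0 :: List.map pvMap t).headI = '_') := by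
        refine ⟨by simp, ?_⟩
        simpa using (pvMap_cond c0).mpr hd
      rw [if_pos hcondA]
      have hjoin_ne : pvJoin (pvToksB (c0 :: t)) ≠ [] := by
        rw [show pvToksB (c0 :: t) =
            ((c0 :: t.takeWhile (fun x => PySem.Chars.isalnum x)).map PySem.Chars.lowerChar)
              :: pvToksB (t.dropWhile (fun x => PySem.Chars.isalnum x)) from by
          rw [pvToksB, if_pos ha]]
        exact pvJoin_ne_nil _ _ (by simp)
      have hcondB : pvJoin (pvToksB (c0 :: t)) ≠ [] ∧
          PySem.Chars.strIsdigit ((c0 :: t).take 1) = true := by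
        refine ⟨hjoin_ne, ?_⟩
        rw [show (c0 :: t).take 1 = [c0] from by simp, pvStrIsdigit_single]
        exact hd
      rw [if_pos hcondB]
      rw [show pvMap c0 :: List.map pvMap t = List.map pvMap (c0 :: t) from by rw [List.map_cons]]
      rw [pvPrefix (List.map pvMap (c0 :: t)) (pvMap c0) (by rw [List.map_cons]; rfl)
        hne]
      rw [pvStrip_pvSq, pvToks_map]
    · have hcondA : ¬ (pvMap c0 :: List.map pvMap t ≠ [] ∧
          ¬ (PySem.Chars.isalpha (pvMap c0 :: List.map pvMap t).headI = true ∨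
            (pvMap c0 :: List.map pvMap t).headI = '_')) := by
        rintro ⟨-, hcond⟩
        exact hd ((pvMap_cond c0).mp (by simpa using hcond))
      rw [if_neg hcondA]
      have hcondB : ¬ (pvJoin (pvToksB (c0 :: t)) ≠ [] ∧
          PySem.Chars.strIsdigit ((c0 :: t).take 1) = true) := by
        rintro ⟨-, hdig⟩
        rw [show (c0 :: t).take 1 = [c0] from by simp, pvStrIsdigit_single] at hdig
        exact hd hdig
      rw [if_neg hcondB]
      rw [show pvMap c0 :: List.map pvMap t = List.map pvMap (c0 :: t) from by rw [List.map_cons]]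
      rw [pvStrip_pvSq, pvToks_map]
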